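-- pv_equiv track=rewrite | github.com/Matheus22Yan/Exerc-cios-de-POO | ProjetosPOO/exercicios_12/listagem_2.py | ddd
-- ===== SOURCE A (Python) =====
-- def numero(entrada, qmin, qmax):
--     num = 0
--     for i, caractere in enumerate(entrada):
--         if caractere.isnumeric():
--             num += 1
--         else:
--             break
--     if qmin <= num <= qmax:
--         return True, 0, num - 1
--     return False, -1, -1
--
-- def ddd(entrada):
--     estado = posicao = 0
--     codigo_ddd = []
--     while posicao < len(entrada):
--         caractere = entrada[posicao]
--         if estado == 0 and caractere == "(":
--             estado = 1
--             codigo_ddd.append(caractere)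
--         elif estado == 1:
--             achou, inicio, fim = numero(entrada[posicao:], 2, 3)
--             if achou:
--                 codigo_ddd.append(entrada[posicao + inicio : posicao + fim + 1])
--                 estado = 2
--                 posicao += fim
--             else:
--                 break
--         elif estado == 2:
--             if caractere == ")":
--                 return True, 0, posicao
--             break
--         else:
--             break
--         posicao += 1
--     return False, -1, -1
-- ===== SOURCE B (Python) =====
-- def ddd(entrada):
--     if not entrada or entrada[0] != "(":
--         return False, -1, -1
--     n = 1
--     while n < len(entrada) and entrada[n].isnumeric():
--         n += 1
--     count = n - 1
--     if 2 <= count <= 3 and n < len(entrada) and entrada[n] == ")":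
--         return True, 0, n
--     return False, -1, -1
-- ===== Notes on version B (the rewrite author's own statement) =====
-- stated objective: simpler
-- what changed: Replaced the explicit state machine (estado register, while loop over positions, separate numero helper with min/max bounds) by straight-line positional parsing: check '(', count leading digits once, then test the count and the closing ')'.
import Mathlib
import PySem

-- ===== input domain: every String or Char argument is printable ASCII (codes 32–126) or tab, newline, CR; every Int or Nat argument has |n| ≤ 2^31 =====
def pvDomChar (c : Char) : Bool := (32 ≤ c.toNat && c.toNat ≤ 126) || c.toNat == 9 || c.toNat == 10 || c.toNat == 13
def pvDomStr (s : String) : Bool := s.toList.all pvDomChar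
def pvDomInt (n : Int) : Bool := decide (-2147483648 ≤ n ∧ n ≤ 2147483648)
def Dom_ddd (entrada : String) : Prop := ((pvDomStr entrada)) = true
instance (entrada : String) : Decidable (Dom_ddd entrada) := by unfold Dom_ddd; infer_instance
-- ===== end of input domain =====

-- B replaces A's state machine (estado register + while loop + numero helper) by
-- straight-line parsing: check '(', count the leading digits, test count and ')' (objective: simpler).
-- On the ASCII domain str.isnumeric coincides with PySem.Chars.isdigit, used by both ports.

-- ===== PORT A =====
-- numero's for-loop with break: count of leading numeric characters
def pvNumCount : List Char → Int
  | [] => 0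
  | c :: r => if PySem.Chars.isdigit c then pvNumCount r + 1 else 0

def pvNumero (entrada : List Char) (qmin qmax : Int) : Bool × Int × Int :=
  let num := pvNumCount entrada
  if qmin ≤ num ∧ num ≤ qmax then (true, 0, num - 1) else (false, -1, -1)

-- the while loop of ddd; fuel only makes the recursion structural (s.length + 1 suffices:
-- posicao strictly increases each iteration).  posicao += fim uses .toNat: fim = num-1 ≥ 1
-- whenever achou holds, so no clamping occurs.
def pvDddLoop (s : List Char) : Nat → Nat → Nat → Bool × Int × Int
  | 0, _, _ => (false, -1, -1)
  | fuel + 1, estado, posicao =>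
    if h : posicao < s.length then
      let c := s[posicao]
      if estado = 0 ∧ c = '(' then pvDddLoop s fuel 1 (posicao + 1)
      else if estado = 1 then
        let r := pvNumero (s.drop posicao) 2 3
        if r.1 then pvDddLoop s fuel 2 (posicao + r.2.2.toNat + 1)
        else (false, -1, -1)
      else if estado = 2 then
        if c = ')' then (true, 0, (posicao : Int)) else (false, -1, -1)
      else (false, -1, -1)
    else (false, -1, -1)

def ddd (entrada : String) : Bool × Int × Int :=
  pvDddLoop entrada.toList (entrada.toList.length + 1) 0 0

-- ===== PORT B =====
-- B's while loop: advance n over consecutive digits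
def pvScan (s : List Char) (n : Nat) : Nat :=
  if h : n < s.length then
    if PySem.Chars.isdigit s[n] then pvScan s (n + 1) else n
  else n
termination_by s.length - n

def ddd_alt (entrada : String) : Bool × Int × Int :=
  match entrada.toList with
  | [] => (false, -1, -1)
  | c :: _ =>
    if c ≠ '(' then (false, -1, -1)
    else
      let s := entrada.toList
      let n := pvScan s 1
      let count := n - 1
      -- 'n < len(entrada) and entrada[n] == ")"' rendered as s[n]? = some ')'
      if 2 ≤ count ∧ count ≤ 3 ∧ s[n]? = some ')' then (true, 0, (n : Int))
      else (false, -1, -1)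

-- ===== PRECONDITION & SPEC =====
def Spec_ddd (entrada : String) (out : Bool × Int × Int) : Prop := out = ddd_alt entrada
instance (entrada : String) (out : Bool × Int × Int) : Decidable (Spec_ddd entrada out) := by unfold Spec_ddd; infer_instance

-- ===== CLAIM (what is proved, stated in full; the proofs are below) =====
def Claim_equal_ddd : Prop := ∀ (entrada : String), Dom_ddd entrada → Spec_ddd entrada (ddd entrada)

-- ===== LEMMAS AND PROOFS =====

theorem pvNumCount_eq (l : List Char) :
    pvNumCount l = ((l.takeWhile (fun c => PySem.Chars.isdigit c)).length : Int) := by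
  induction l with
  | nil => simp [pvNumCount]
  | cons c r ih =>
    by_cases h : PySem.Chars.isdigit c <;> simp [pvNumCount, h, ih]

theorem pvScan_eq (s : List Char) (n : Nat) :
    pvScan s n = n + ((s.drop n).takeWhile (fun c => PySem.Chars.isdigit c)).length := by
  by_cases h : n < s.length
  · rw [List.drop_eq_getElem_cons h]
    by_cases hd : PySem.Chars.isdigit s[n]
    · rw [pvScan, dif_pos h, if_pos hd, pvScan_eq s (n + 1), List.takeWhile_cons, if_pos hd]
      simp; omega
    · rw [pvScan, dif_pos h, if_neg hd, List.takeWhile_cons, if_neg hd]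
      simp
  · rw [pvScan, dif_neg h, List.drop_eq_nil_of_le (by omega)]
    simp
termination_by s.length - n

theorem loop_state0 (s : List Char) (fuel p : Nat) :
    pvDddLoop s (fuel + 1) 0 p =
      if h : p < s.length then
        (if s[p] = '(' then pvDddLoop s fuel 1 (p + 1) else (false, -1, -1))
      else (false, -1, -1) := by
  rw [pvDddLoop]
  by_cases h : p < s.length
  · rw [dif_pos h, dif_pos h]
    by_cases hc : s[p] = '(' <;> simp [hc]
  · rw [dif_neg h, dif_neg h]

theorem loop_state1 (s : List Char) (fuel p : Nat) :
    pvDddLoop s (fuel + 1) 1 p =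
      if _h : p < s.length then
        (let r := pvNumero (s.drop p) 2 3
         if r.1 then pvDddLoop s fuel 2 (p + r.2.2.toNat + 1) else (false, -1, -1))
      else (false, -1, -1) := by
  rw [pvDddLoop]
  by_cases h : p < s.length
  · rw [dif_pos h, dif_pos h]
    simp
  · rw [dif_neg h, dif_neg h]

theorem loop_state2 (s : List Char) (fuel p : Nat) :
    pvDddLoop s (fuel + 1) 2 p =
      if h : p < s.length then
        (if s[p] = ')' then (true, 0, (p : Int)) else (false, -1, -1))
      else (false, -1, -1) := by
  rw [pvDddLoop]
  by_cases h : p < s.length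
  · rw [dif_pos h, dif_pos h]
    by_cases hc : s[p] = ')' <;> simp [hc]
  · rw [dif_neg h, dif_neg h]

theorem ddd_spec_aux (entrada : String) : ddd entrada = ddd_alt entrada := by
  unfold ddd ddd_alt
  cases hs : entrada.toList with
  | nil => simp [pvDddLoop]
  | cons c rest =>
    rw [loop_state0, dif_pos (by simp)]
    simp only [List.getElem_cons_zero]
    by_cases hc : c = '('
    · subst hc
      rw [if_pos rfl]
      simp only [ne_eq, not_true_eq_false, if_false, List.length_cons]
      cases hr : rest with
      | nil =>
        rw [loop_state1, dif_neg (by simp)]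
        have : pvScan ['('] 1 = 1 := by rw [pvScan]; simp
        simp [this]
      | cons c1 rest1 =>
        simp only [List.length_cons]
        rw [loop_state1, dif_pos (by simp)]
        set k : Nat := ((c1 :: rest1).takeWhile (fun c => PySem.Chars.isdigit c)).length with hk
        have hscan : pvScan ('(' :: c1 :: rest1) 1 = k + 1 := by
          rw [pvScan_eq]
          show 1 + k = k + 1
          omega
        have hnum : pvNumero ((('(' :: c1 :: rest1).drop 1)) 2 3 =
            (if 2 ≤ (k : Int) ∧ (k : Int) ≤ 3 then (true, 0, (k : Int) - 1)
             else (false, -1, -1)) := by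
          show pvNumero (c1 :: rest1) 2 3 = _
          rw [pvNumero, pvNumCount_eq]
        rw [hscan]
        simp only [hnum]
        by_cases hkr : 2 ≤ (k : Int) ∧ (k : Int) ≤ 3
        · rw [if_pos hkr]
          have hk2 : 2 ≤ k := by exact_mod_cast hkr.1
          have hk3 : k ≤ 3 := by exact_mod_cast hkr.2
          simp only
          rw [show 1 + ((k : Int) - 1).toNat + 1 = k + 1 by omega]
          rw [loop_state2]
          by_cases hin : k + 1 < ('(' :: c1 :: rest1).length
          · rw [dif_pos hin]
            have hsome : (('(' :: c1 :: rest1)[k + 1]?) =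
                some (('(' :: c1 :: rest1)[k + 1]'hin) :=
              List.getElem?_eq_getElem hin
            by_cases hcl : ('(' :: c1 :: rest1)[k + 1]'hin = ')'
            · simp only [hsome, hcl]
              simp
              omega
            · have hcond : ¬(2 ≤ k + 1 - 1 ∧ k + 1 - 1 ≤ 3 ∧
                  (('(' :: c1 :: rest1)[k + 1]?) = some ')') := by
                rw [hsome]
                rintro ⟨-, -, hx⟩
                exact hcl (Option.some.inj hx)
              rw [if_neg hcl, if_neg hcond]
              simp
          · have hnone : (('(' :: c1 :: rest1)[k + 1]?) = none :=
              List.getElem?_eq_none (by omega)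
            have hcond : ¬(2 ≤ k + 1 - 1 ∧ k + 1 - 1 ≤ 3 ∧
                (('(' :: c1 :: rest1)[k + 1]?) = some ')') := by
              rw [hnone]
              rintro ⟨-, -, hx⟩
              cases hx
            rw [dif_neg hin, if_neg hcond]
            simp
        · rw [if_neg hkr]
          have hcond : ¬(2 ≤ k + 1 - 1 ∧ k + 1 - 1 ≤ 3 ∧
              (('(' :: c1 :: rest1)[k + 1]?) = some ')') := by
            rintro ⟨h2, h3, -⟩
            exact hkr ⟨by omega, by omega⟩
          simp only
          rw [if_neg hcond]
          simp
    · rw [if_neg hc, if_pos hc]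

-- ===== VERDICT (by name: the statement is the Claim_ definition above) =====
theorem ddd_spec : Claim_equal_ddd := by
  intro entrada _
  unfold Spec_ddd
  exact ddd_spec_aux entrada
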